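-- pv_equiv track=rewrite | github.com/DyogoBendo/exercicios-maratona-programacao | davi/Array, Matrizes e Funções/fitacolorida_neps.py | analisar_distancia
-- ===== SOURCE A (Python) =====
-- def analisar_distancia(lista):
--     i = 0
--     temp = []
--     for j in lista:
--         if j != 0:
--             i += 1
--             if i < 9:
--                 temp.append(i)
--             else:
--                 temp.append(9)
--         else:
--             for _ in range(i):
--                 temp.pop()
--             temp2 = []
--             for x in range(i+1):
--                 if x < 9:
--                     temp2.append(x)
--                 else:
--                     temp2.append(9)
--             temp.extend(reversed(temp2))
--             i = 0
--     return temp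
-- ===== SOURCE B (Python) =====
-- def analisar_distancia(lista):
--     out = []
--     i = 0
--     for j in lista:
--         if j != 0:
--             i += 1
--         else:
--             for x in range(i, -1, -1):
--                 out.append(min(x, 9))
--             i = 0
--     for x in range(1, i + 1):
--         out.append(min(x, 9))
--     return out
-- ===== Notes on version B (the rewrite author's own statement) =====
-- stated objective: simpler
-- what changed: B keeps only a run-length counter and emits each descending ramp directly when a zero is hit (plus the ascending trailing run after the loop), instead of A's speculative append-then-pop rebuild of a live buffer.
import Mathlib
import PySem

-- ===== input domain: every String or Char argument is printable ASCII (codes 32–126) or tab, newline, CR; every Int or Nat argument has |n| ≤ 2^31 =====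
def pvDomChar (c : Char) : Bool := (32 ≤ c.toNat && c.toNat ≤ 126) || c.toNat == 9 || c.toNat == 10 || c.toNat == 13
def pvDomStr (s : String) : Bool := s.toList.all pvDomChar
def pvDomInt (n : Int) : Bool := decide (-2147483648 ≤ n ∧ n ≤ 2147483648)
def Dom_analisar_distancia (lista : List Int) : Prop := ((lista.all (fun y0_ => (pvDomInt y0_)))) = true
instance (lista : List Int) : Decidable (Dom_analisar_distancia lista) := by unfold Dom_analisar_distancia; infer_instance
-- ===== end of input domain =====

-- B replaces A's append-then-pop live buffer with a bare run-length counter, emitting each ramp once; objective: simpler.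

-- ===== PORT A =====
-- A's for-loop as structural recursion over the same state (i, temp).
-- 'temp.pop()' i times is ported as i-fold dropLast: exact, since A pops only
-- the i elements it appended during the current run, so temp is never empty there.
def pvALoop (lista : List Int) (i : Int) (temp : List Int) : List Int :=
  match lista with
  | [] => temp
  | j :: rest =>
    if j ≠ 0 then
      let i' := i + 1
      pvALoop rest i' (temp ++ [if i' < 9 then i' else 9])
    else
      let temp' := (List.range i.toNat).foldl (fun t _ => t.dropLast) temp
      let temp2 := (List.range (i + 1).toNat).foldl
        (fun t2 (x : Nat) => t2 ++ [if (x : Int) < 9 then (x : Int) else 9]) []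
      pvALoop rest 0 (temp' ++ temp2.reverse)

def analisar_distancia (lista : List Int) : List Int := pvALoop lista 0 []

-- ===== PORT B =====
-- B's loop: only the counter i is maintained; ramps are appended to out directly.
def pvBLoop (lista : List Int) (i : Int) (out : List Int) : List Int :=
  match lista with
  | [] => (PySem.List.pyRange 1 (i + 1) 1).foldl (fun t x => t ++ [min x 9]) out
  | j :: rest =>
    if j ≠ 0 then
      pvBLoop rest (i + 1) out
    else
      pvBLoop rest 0 ((PySem.List.pyRange i (-1) (-1)).foldl (fun t x => t ++ [min x 9]) out)

def analisar_distancia_alt (lista : List Int) : List Int := pvBLoop lista 0 []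

-- ===== PRECONDITION & SPEC =====
def Spec_analisar_distancia (lista : List Int) (out : List Int) : Prop := out = analisar_distancia_alt lista
instance (lista : List Int) (out : List Int) : Decidable (Spec_analisar_distancia lista out) := by unfold Spec_analisar_distancia; infer_instance

-- ===== CLAIM (what is proved, stated in full; the proofs are below) =====
def Claim_equal_analisar_distancia : Prop := ∀ (lista : List Int), Dom_analisar_distancia lista → Spec_analisar_distancia lista (analisar_distancia lista)

-- ===== LEMMAS AND PROOFS =====

-- the ascending run A keeps in its buffer after n consecutive non-zeros
def pvAsc (n : Nat) : List Int := (List.range n).map (fun (k : Nat) => min ((k : Int) + 1) 9)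

-- generic: an append-singleton foldl is init ++ map
theorem pv_foldl_app {α β : Type} (f : α → β) :
    ∀ (l : List α) (c : List β), l.foldl (fun t x => t ++ [f x]) c = c ++ l.map f := by
  intro l
  induction l with
  | nil => simp
  | cons x xs ih => intro c; simp [List.foldl, ih]

-- n-fold dropLast removes a suffix of length n
theorem pv_dropN (n : Nat) :
    ∀ (out l : List Int), l.length = n →
      (List.range n).foldl (fun t _ => t.dropLast) (out ++ l) = out := by
  induction n with
  | zero => intro out l h; simp [List.length_eq_zero_iff.mp h]
  | succ n ih =>
    intro out l h
    rcases List.eq_nil_or_concat l with rfl | ⟨l', a, rfl⟩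
    · simp at h
    · have hl : l'.length = n := by simpa using h
      rw [List.range_succ_eq_map, List.foldl_cons, List.foldl_map]
      have hd : (out ++ l'.concat a).dropLast = out ++ l' := by
        simp [List.concat_eq_append, ← List.append_assoc]
      rw [hd, ih out l' hl]

theorem pv_asc_succ (n : Nat) :
    pvAsc (n + 1) = pvAsc n ++ [if ((n : Int) + 1) < 9 then (n : Int) + 1 else 9] := by
  unfold pvAsc
  rw [List.range_succ, List.map_append, List.map_singleton]
  have h : min ((n : Int) + 1) 9 = if ((n : Int) + 1) < 9 then (n : Int) + 1 else 9 := by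
    split_ifs <;> omega
  rw [h]

-- the descending ramp emitted on a zero is the same list on both sides
theorem pv_ramp (n : Nat) :
    ((List.range (n + 1)).map (fun (x : Nat) => if (x : Int) < 9 then (x : Int) else 9)).reverse
      = (PySem.List.pyRange (n : Int) (-1) (-1)).map (fun x => min x 9) := by
  induction n with
  | zero =>
    rw [PySem.List.pyRange_neg_one_cons (by omega), PySem.List.pyRange_neg_one_eq_nil (by omega)]
    simp
  | succ n ih =>
    rw [PySem.List.pyRange_neg_one_cons (by push_cast; omega), List.map_cons]
    have h1 : (((n + 1 : Nat) : Int)) - 1 = (n : Int) := by push_cast; ring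
    rw [h1, ← ih, List.range_succ, List.map_append, List.reverse_append]
    simp only [List.map_singleton, List.reverse_singleton, List.singleton_append]
    have h : (if (((n + 1 : Nat) : Int)) < 9 then ((n + 1 : Nat) : Int) else 9) = min (((n + 1 : Nat) : Int)) 9 := by
      split_ifs <;> omega
    rw [h]

-- the trailing ascending run B emits equals pvAsc
theorem pv_trail (n : Nat) :
    (PySem.List.pyRange 1 ((n : Int) + 1) 1).map (fun x => min x 9) = pvAsc n := by
  rw [PySem.List.pyRange_one]
  have h : ((n : Int) + 1 - 1).toNat = n := by omega
  rw [h, List.map_map]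
  unfold pvAsc
  apply List.map_congr_left
  intro k hk
  simp only [Function.comp]
  omega

-- main invariant: A's buffer is B's output plus the current ascending run
theorem pv_loop_eq :
    ∀ (lista : List Int) (n : Nat) (out : List Int),
      pvALoop lista (n : Int) (out ++ pvAsc n) = pvBLoop lista (n : Int) out := by
  intro lista
  induction lista with
  | nil =>
    intro n out
    simp only [pvALoop, pvBLoop]
    rw [pv_foldl_app, pv_trail]
  | cons j rest ih =>
    intro n out
    simp only [pvALoop, pvBLoop]
    by_cases hj : j ≠ 0
    · simp only [if_pos hj]
      have h1 : (n : Int) + 1 = ((n + 1 : Nat) : Int) := by push_cast; ring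
      rw [List.append_assoc, ← pv_asc_succ, h1, ih (n + 1) out]
    · simp only [if_neg hj]
      have ht : (List.range ((n : Int)).toNat).foldl (fun t _ => t.dropLast) (out ++ pvAsc n) = out := by
        have h : ((n : Int)).toNat = n := by omega
        rw [h]
        exact pv_dropN n out (pvAsc n) (by simp [pvAsc])
      have h2 : ((n : Int) + 1).toNat = n + 1 := by omega
      rw [ht, h2, pv_foldl_app, List.nil_append, pv_ramp, ← pv_foldl_app]
      have h0 : (0 : Int) = ((0 : Nat) : Int) := rfl
      rw [h0, ← ih 0]
      simp [pvAsc]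

-- ===== VERDICT (by name: the statement is the Claim_ definition above) =====
theorem analisar_distancia_spec : Claim_equal_analisar_distancia := by
  intro lista _
  unfold Spec_analisar_distancia analisar_distancia analisar_distancia_alt
  have h := pv_loop_eq lista 0 []
  simpa [pvAsc] using h
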